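-- pv_equiv track=rewrite | github.com/MozesCsaszar/Python-Programs | Project Euler Problem Solutions/72.py | calc_nr_to_add
-- ===== SOURCE A (Python) =====
-- def calc_things(factors, start_i, bound, p):
--     for i in range(start_i, len(factors)):
--         if factors[i] * p <= bound:
--             if start_i > 0:
--                 yield factors[i] * p
--             yield from calc_things(factors, i + 1, bound, factors[i] * p)
--
-- def calc_nr_to_add(factors, bound):
--     to_ret = 0
--     if len(factors) == 1:
--         return bound
--     for i in factors:
--         to_ret += bound//i
--     for i in calc_things(factors,0,bound,1):
--         to_ret -= bound//i
--     return bound - to_ret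
-- ===== SOURCE B (Python) =====
-- def calc_nr_to_add(factors, bound):
--     if len(factors) == 1:
--         return bound
--     n = len(factors)
--     total = bound
--     level = []
--     j = 0
--     for f in factors:
--         total -= bound // f
--         if f <= bound:
--             level.append((j + 1, f))
--         j += 1
--     while level:
--         nxt = []
--         for i, p in level:
--             for k in range(i, n):
--                 q = factors[k] * p
--                 if q <= bound:
--                     total += bound // q
--                     nxt.append((k + 1, q))
--         level = nxt
--     return total
-- ===== Notes on version B (the rewrite author's own statement) =====
-- stated objective: alternative
-- what changed: Replaces the recursive generator plus separate subtraction loop by an iterative breadth-first worklist of (index, product) pairs that folds the inclusion-exclusion corrections directly into the running total.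
import Mathlib
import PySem

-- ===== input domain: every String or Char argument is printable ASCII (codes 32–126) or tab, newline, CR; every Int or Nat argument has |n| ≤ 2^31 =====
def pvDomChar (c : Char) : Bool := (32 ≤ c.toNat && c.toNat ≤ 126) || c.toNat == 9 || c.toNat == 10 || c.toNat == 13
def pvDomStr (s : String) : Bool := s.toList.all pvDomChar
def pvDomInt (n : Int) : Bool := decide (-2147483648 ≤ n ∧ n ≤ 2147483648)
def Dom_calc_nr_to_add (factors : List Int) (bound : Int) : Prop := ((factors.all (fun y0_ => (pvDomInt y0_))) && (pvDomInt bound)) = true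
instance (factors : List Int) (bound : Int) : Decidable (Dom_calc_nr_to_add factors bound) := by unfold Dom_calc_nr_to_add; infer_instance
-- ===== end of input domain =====

-- B replaces A's recursive generator + separate subtraction loop by an iterative
-- breadth-first worklist accumulating the same corrections directly (alternative
-- decomposition, same asymptotic cost).

-- ===== PORT A =====
-- Python's `calc_things(factors, start_i, bound, p)` generator, as the list of its
-- yields.  The loop body's recursive call `calc_things(factors, i+1, bound, f*p)`
-- is inlined as `calcThingsLoop factors (i+1) (i+1) …` (calc_things s = loop with
-- i starting at s); `i` is the loop variable, `start_i` only feeds the `start_i > 0` test.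
def calcThingsLoop (factors : List Int) (start_i i : Nat) (bound p : Int) : List Int :=
  if h : i < factors.length then
    (if factors[i] * p ≤ bound then
      (if 0 < start_i then [factors[i] * p] else [])
        ++ calcThingsLoop factors (i + 1) (i + 1) bound (factors[i] * p)
    else [])
    ++ calcThingsLoop factors start_i (i + 1) bound p
  else []
termination_by factors.length - i

def calc_nr_to_add (factors : List Int) (bound : Int) : Int :=
  if factors.length == 1 then bound
  else
    let t1 := factors.foldl (fun acc i => acc + PySem.Int.floordiv bound i) 0
    let t2 := (calcThingsLoop factors 0 0 bound 1).foldl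
      (fun acc i => acc - PySem.Int.floordiv bound i) t1
    bound - t2

-- ===== PORT B =====
-- inner `for k in range(i, n): …` loop of Source B: adds bound//q to the total and
-- appends (k+1, q) to nxt for each valid extension.
def expandEntry (factors : List Int) (bound : Int) (k : Nat) (p : Int)
    (st : Int × List (Nat × Int)) : Int × List (Nat × Int) :=
  if h : k < factors.length then
    expandEntry factors bound (k + 1) p
      (if factors[k] * p ≤ bound then
        (st.1 + PySem.Int.floordiv bound (factors[k] * p), st.2 ++ [(k + 1, factors[k] * p)])
      else st)
  else st
termination_by factors.length - k

-- the `while level:` worklist loop; fuel = factors.length + 1 provably never runs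
-- out (every entry's index strictly grows each round and is ≤ factors.length).
def bfsLoop (factors : List Int) (bound : Int) : Nat → List (Nat × Int) → Int → Int
  | _, [], total => total
  | 0, _, total => total
  | fuel + 1, level, total =>
    let st := level.foldl (fun st e => expandEntry factors bound e.1 e.2 st) (total, [])
    bfsLoop factors bound fuel st.2 st.1

def calc_nr_to_add_alt (factors : List Int) (bound : Int) : Int :=
  if factors.length == 1 then bound
  else
    let init := factors.foldl
      (fun (st : Int × List (Nat × Int) × Nat) f =>
        (st.1 - PySem.Int.floordiv bound f,
         (if f ≤ bound then st.2.1 ++ [(st.2.2 + 1, f)] else st.2.1),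
         st.2.2 + 1))
      (bound, [], 0)
    bfsLoop factors bound (factors.length + 1) init.2.1 init.1

-- ===== PRECONDITION & SPEC =====
-- Pre_ excludes exactly the inputs on which Python A raises ZeroDivisionError
-- (a zero factor in a list of length ≠ 1); B raises there too.
def Pre_calc_nr_to_add (factors : List Int) (bound : Int) : Prop :=
  factors.length = 1 ∨ (0 : Int) ∉ factors
instance (factors : List Int) (bound : Int) : Decidable (Pre_calc_nr_to_add factors bound) := by
  unfold Pre_calc_nr_to_add; infer_instance

def pvWitness_calc_nr_to_add : List Int × Int := ([2, 3, 5], 10)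

def Spec_calc_nr_to_add (factors : List Int) (bound : Int) (out : Int) : Prop := out = calc_nr_to_add_alt factors bound
instance (factors : List Int) (bound : Int) (out : Int) : Decidable (Spec_calc_nr_to_add factors bound out) := by unfold Spec_calc_nr_to_add; infer_instance

-- ===== CLAIM (what is proved, stated in full; the proofs are below) =====
def Claim_equal_calc_nr_to_add : Prop := ∀ (factors : List Int) (bound : Int), Dom_calc_nr_to_add factors bound → Pre_calc_nr_to_add factors bound → Spec_calc_nr_to_add factors bound (calc_nr_to_add factors bound)

-- ===== LEMMAS AND PROOFS =====

-- sum over valid prefix-chains (size ≥ 1) of bound // product: the common spec.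
def Fsum (bound : Int) : List Int → Int → Int
  | [], _ => 0
  | f :: rest, p =>
    (if f * p ≤ bound then PySem.Int.floordiv bound (f * p) + Fsum bound rest (f * p) else 0)
      + Fsum bound rest p

-- top-level variant: singletons contribute no term of their own.
def Ysum (bound : Int) : List Int → Int → Int
  | [], _ => 0
  | f :: rest, p =>
    (if f * p ≤ bound then Fsum bound rest (f * p) else 0) + Ysum bound rest p

def sumDiv (bound : Int) (l : List Int) : Int :=
  (l.map (fun x => PySem.Int.floordiv bound x)).sum

-- levelF: total still owed by a worklist level (Fsum of each pending subtree root).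
def levelF (bound : Int) (factors : List Int) (level : List (Nat × Int)) : Int :=
  (level.map (fun e => Fsum bound (factors.drop e.1) e.2)).sum

-- direct contributions and children produced by expanding one entry.
def dSum (bound : Int) (factors : List Int) (k : Nat) (p : Int) : Int :=
  if h : k < factors.length then
    (if factors[k] * p ≤ bound then PySem.Int.floordiv bound (factors[k] * p) else 0)
      + dSum bound factors (k + 1) p
  else 0
termination_by factors.length - k

def childrenL (bound : Int) (factors : List Int) (k : Nat) (p : Int) : List (Nat × Int) :=
  if h : k < factors.length then
    (if factors[k] * p ≤ bound then [(k + 1, factors[k] * p)] else [])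
      ++ childrenL bound factors (k + 1) p
  else []
termination_by factors.length - k

def initLevel (bound : Int) : List Int → Nat → List (Nat × Int)
  | [], _ => []
  | f :: rest, j => (if f ≤ bound then [(j + 1, f)] else []) ++ initLevel bound rest (j + 1)

theorem sumDiv_nil (bound : Int) : sumDiv bound [] = 0 := rfl

theorem sumDiv_append (bound : Int) (a b : List Int) :
    sumDiv bound (a ++ b) = sumDiv bound a + sumDiv bound b := by
  simp [sumDiv]

theorem foldl_sub_div (bound : Int) :
    ∀ (l : List Int) (init : Int),
      l.foldl (fun acc x => acc - PySem.Int.floordiv bound x) init = init - sumDiv bound l := by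
  intro l
  induction l with
  | nil => intro init; simp [sumDiv]
  | cons f t ih => intro init; rw [List.foldl_cons, ih]; simp [sumDiv]; ring

theorem foldl_add_div (bound : Int) :
    ∀ (l : List Int) (init : Int),
      l.foldl (fun acc x => acc + PySem.Int.floordiv bound x) init = init + sumDiv bound l := by
  intro l
  induction l with
  | nil => intro init; simp [sumDiv]
  | cons f t ih => intro init; rw [List.foldl_cons, ih]; simp [sumDiv]; ring

-- A's generator, recursive calls (start_i > 0): its yields sum to Fsum.
theorem sumDiv_calcThingsLoop_pos (factors : List Int) (bound : Int) :
    ∀ (n i s : Nat) (p : Int), factors.length ≤ i + n → 0 < s →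
      sumDiv bound (calcThingsLoop factors s i bound p) = Fsum bound (factors.drop i) p := by
  intro n
  induction n with
  | zero =>
    intro i s p h _
    rw [calcThingsLoop, dif_neg (by omega), List.drop_eq_nil_of_le (by omega)]
    rfl
  | succ n ih =>
    intro i s p h hs
    rw [calcThingsLoop]
    by_cases hi : i < factors.length
    · rw [dif_pos hi, List.drop_eq_getElem_cons hi]
      by_cases hv : factors[i] * p ≤ bound
      · rw [if_pos hv, if_pos hs]
        rw [sumDiv_append, sumDiv_append,
          ih (i + 1) (i + 1) (factors[i] * p) (by omega) (by omega),
          ih (i + 1) s p (by omega) hs]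
        show PySem.Int.floordiv bound (factors[i] * p) + 0 + _ + _ = Fsum bound _ p
        rw [Fsum, if_pos hv]; ring
      · rw [if_neg hv]
        rw [sumDiv_append, sumDiv_nil, ih (i + 1) s p (by omega) hs, Fsum, if_neg hv]
    · rw [dif_neg hi, List.drop_eq_nil_of_le (by omega)]
      rfl

-- A's generator, top-level call (start_i = 0): its yields sum to Ysum.
theorem sumDiv_calcThingsLoop_zero (factors : List Int) (bound : Int) :
    ∀ (n i : Nat) (p : Int), factors.length ≤ i + n →
      sumDiv bound (calcThingsLoop factors 0 i bound p) = Ysum bound (factors.drop i) p := by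
  intro n
  induction n with
  | zero =>
    intro i p h
    rw [calcThingsLoop, dif_neg (by omega), List.drop_eq_nil_of_le (by omega)]
    rfl
  | succ n ih =>
    intro i p h
    rw [calcThingsLoop]
    by_cases hi : i < factors.length
    · rw [dif_pos hi, List.drop_eq_getElem_cons hi]
      by_cases hv : factors[i] * p ≤ bound
      · rw [if_pos hv, if_neg (by omega)]
        rw [sumDiv_append, List.nil_append,
          sumDiv_calcThingsLoop_pos factors bound (factors.length) (i + 1) (i + 1)
            (factors[i] * p) (by omega) (by omega),
          ih (i + 1) p (by omega), Ysum, if_pos hv]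
      · rw [if_neg hv]
        rw [sumDiv_append, sumDiv_nil, ih (i + 1) p (by omega), Ysum, if_neg hv]
    · rw [dif_neg hi, List.drop_eq_nil_of_le (by omega)]
      rfl

-- expanding one entry = add its direct contributions, append its children.
theorem expandEntry_eq (factors : List Int) (bound : Int) :
    ∀ (n k : Nat) (p : Int) (t : Int) (nx : List (Nat × Int)), factors.length ≤ k + n →
      expandEntry factors bound k p (t, nx)
        = (t + dSum bound factors k p, nx ++ childrenL bound factors k p) := by
  intro n
  induction n with
  | zero =>
    intro k p t nx h
    rw [expandEntry, dif_neg (by omega), dSum, dif_neg (by omega),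
      childrenL, dif_neg (by omega)]
    simp
  | succ n ih =>
    intro k p t nx h
    by_cases hk : k < factors.length
    · rw [expandEntry, dSum, childrenL, dif_pos hk, dif_pos hk, dif_pos hk]
      by_cases hv : factors[k] * p ≤ bound
      · rw [if_pos hv, if_pos hv, if_pos hv, ih (k + 1) p _ _ (by omega)]
        simp [add_assoc]
      · rw [if_neg hv, if_neg hv, if_neg hv, ih (k + 1) p t nx (by omega)]
        simp
    · rw [expandEntry, dif_neg hk, dSum, dif_neg hk, childrenL, dif_neg hk]
      simp

-- the Fsum owed by a subtree root = its direct contributions + Fsum owed by its children.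
theorem Fsum_eq_dSum_add_children (factors : List Int) (bound : Int) :
    ∀ (n k : Nat) (p : Int), factors.length ≤ k + n →
      Fsum bound (factors.drop k) p
        = dSum bound factors k p + levelF bound factors (childrenL bound factors k p) := by
  intro n
  induction n with
  | zero =>
    intro k p h
    rw [List.drop_eq_nil_of_le (by omega), dSum, dif_neg (by omega),
      childrenL, dif_neg (by omega)]
    rfl
  | succ n ih =>
    intro k p h
    by_cases hk : k < factors.length
    · rw [List.drop_eq_getElem_cons hk, Fsum, dSum, dif_pos hk, childrenL, dif_pos hk,
        ih (k + 1) p (by omega)]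
      by_cases hv : factors[k] * p ≤ bound
      · rw [if_pos hv, if_pos hv, if_pos hv]
        simp [levelF]; ring
      · rw [if_neg hv, if_neg hv, if_neg hv]
        simp [levelF]
    · rw [List.drop_eq_nil_of_le (by omega), dSum, dif_neg (by omega),
        childrenL, dif_neg (by omega)]
      rfl

theorem levelF_append (bound : Int) (factors : List Int) (a b : List (Nat × Int)) :
    levelF bound factors (a ++ b) = levelF bound factors a + levelF bound factors b := by
  simp [levelF]

-- folding expandEntry over a whole level.
theorem foldl_expand_eq (factors : List Int) (bound : Int) :
    ∀ (level : List (Nat × Int)) (t : Int) (nx : List (Nat × Int)),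
      level.foldl (fun st e => expandEntry factors bound e.1 e.2 st) (t, nx)
        = (t + (level.map (fun e => dSum bound factors e.1 e.2)).sum,
           nx ++ level.flatMap (fun e => childrenL bound factors e.1 e.2)) := by
  intro level
  induction level with
  | nil => intro t nx; simp
  | cons e rest ih =>
    intro t nx
    rw [List.foldl_cons, expandEntry_eq factors bound factors.length e.1 e.2 t nx (by omega), ih]
    simp [add_assoc]

theorem levelF_flatMap_children (factors : List Int) (bound : Int) :
    ∀ (level : List (Nat × Int)),
      levelF bound factors (level.flatMap (fun e => childrenL bound factors e.1 e.2))
        = (level.map (fun e => Fsum bound (factors.drop e.1) e.2)).sum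
          - (level.map (fun e => dSum bound factors e.1 e.2)).sum := by
  intro level
  induction level with
  | nil => simp [levelF]
  | cons e rest ih =>
    rw [List.flatMap_cons, levelF_append, ih]
    simp only [List.map_cons, List.sum_cons]
    rw [Fsum_eq_dSum_add_children factors bound factors.length e.1 e.2 (by omega)]
    ring

-- entries produced as children carry a strictly larger index.
theorem childrenL_index_gt (factors : List Int) (bound : Int) :
    ∀ (n k : Nat) (p : Int) (e : Nat × Int), factors.length ≤ k + n →
      e ∈ childrenL bound factors k p → k < e.1 := by
  intro n
  induction n with
  | zero =>
    intro k p e h he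
    rw [childrenL, dif_neg (by omega)] at he
    simp at he
  | succ n ih =>
    intro k p e h he
    by_cases hk : k < factors.length
    · rw [childrenL, dif_pos hk] at he
      rcases List.mem_append.1 he with h1 | h2
      · by_cases hv : factors[k] * p ≤ bound
        · rw [if_pos hv] at h1
          rcases List.mem_singleton.1 h1 with rfl
          simp
        · rw [if_neg hv] at h1; simp at h1
      · have := ih (k + 1) p e (by omega) h2; omega
    · rw [childrenL, dif_neg (by omega)] at he
      simp at he

-- the worklist loop pays off exactly the Fsum owed by its level (fuel never binds).
theorem bfsLoop_eq (factors : List Int) (bound : Int) :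
    ∀ (fuel : Nat) (level : List (Nat × Int)) (total : Int),
      (∀ e ∈ level, factors.length < e.1 + fuel) →
      bfsLoop factors bound fuel level total = total + levelF bound factors level := by
  intro fuel
  induction fuel with
  | zero =>
    intro level total h
    have hz : levelF bound factors level = 0 := by
      apply List.sum_eq_zero
      intro x hx
      rcases List.mem_map.1 hx with ⟨e, he, rfl⟩
      rw [List.drop_eq_nil_of_le (by have := h e he; omega)]
      rfl
    cases level with
    | nil => rw [hz, add_zero]; rfl
    | cons e t => rw [hz, add_zero]; rfl
  | succ fuel ih =>
    intro level total h
    cases level with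
    | nil => simp [bfsLoop, levelF]
    | cons e t =>
      have hstep : bfsLoop factors bound (fuel + 1) (e :: t) total
          = bfsLoop factors bound fuel
              ((e :: t).foldl (fun st e' => expandEntry factors bound e'.1 e'.2 st) (total, [])).2
              ((e :: t).foldl (fun st e' => expandEntry factors bound e'.1 e'.2 st) (total, [])).1 := rfl
      rw [hstep, foldl_expand_eq]
      show bfsLoop factors bound fuel
          ([] ++ (e :: t).flatMap (fun e' => childrenL bound factors e'.1 e'.2))
          (total + ((e :: t).map (fun e' => dSum bound factors e'.1 e'.2)).sum)
        = total + levelF bound factors (e :: t)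
      rw [List.nil_append]
      rw [ih _ _ (by
        intro e' he'
        rcases List.mem_flatMap.1 he' with ⟨par, hpar, hc⟩
        have h1 := childrenL_index_gt factors bound factors.length par.1 par.2 e' (by omega) hc
        have h2 := h par hpar
        omega)]
      rw [levelF_flatMap_children]
      simp only [levelF]
      ring

-- first loop of B: subtracts all singleton terms, builds the depth-1 level.
theorem foldl_init_eq (bound : Int) :
    ∀ (l : List Int) (t : Int) (lv : List (Nat × Int)) (j : Nat),
      l.foldl
        (fun (st : Int × List (Nat × Int) × Nat) f =>
          (st.1 - PySem.Int.floordiv bound f,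
           (if f ≤ bound then st.2.1 ++ [(st.2.2 + 1, f)] else st.2.1),
           st.2.2 + 1))
        (t, lv, j)
        = (t - sumDiv bound l, lv ++ initLevel bound l j, j + l.length) := by
  intro l
  induction l with
  | nil => intro t lv j; simp [sumDiv, initLevel]
  | cons f rest ih =>
    intro t lv j
    rw [List.foldl_cons]
    by_cases hf : f ≤ bound
    · simp only [if_pos hf]
      rw [ih]
      simp only [initLevel, if_pos hf, sumDiv, List.map_cons, List.sum_cons, List.length_cons,
        List.append_assoc, List.singleton_append, Prod.mk.injEq]
      exact ⟨by ring, trivial, by omega⟩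
    · simp only [if_neg hf]
      rw [ih]
      simp only [initLevel, if_neg hf, sumDiv, List.map_cons, List.sum_cons, List.length_cons,
        List.nil_append, Prod.mk.injEq]
      exact ⟨by ring, trivial, by omega⟩

-- the depth-1 level owes exactly Ysum.
theorem levelF_initLevel (factors : List Int) (bound : Int) :
    ∀ (n j : Nat), factors.length ≤ j + n →
      levelF bound factors (initLevel bound (factors.drop j) j)
        = Ysum bound (factors.drop j) 1 := by
  intro n
  induction n with
  | zero =>
    intro j h
    rw [List.drop_eq_nil_of_le (by omega)]
    rfl
  | succ n ih =>
    intro j h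
    by_cases hj : j < factors.length
    · rw [List.drop_eq_getElem_cons hj, initLevel, Ysum, levelF_append, ih (j + 1) (by omega)]
      by_cases hf : factors[j] ≤ bound
      · rw [if_pos hf, if_pos (by simpa using hf)]
        simp [levelF]
      · rw [if_neg hf, if_neg (by simpa using hf)]
        simp [levelF]
    · rw [List.drop_eq_nil_of_le (by omega)]
      rfl

-- ===== VERDICT (by name: the statement is the Claim_ definition above) =====
theorem calc_nr_to_add_spec : Claim_equal_calc_nr_to_add := by
  intro factors bound _ _
  unfold Spec_calc_nr_to_add calc_nr_to_add calc_nr_to_add_alt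
  by_cases h1 : factors.length == 1
  · rw [if_pos h1, if_pos h1]
  · rw [if_neg h1, if_neg h1]
    show bound - _ = bfsLoop factors bound (factors.length + 1) _ _
    rw [foldl_add_div, foldl_sub_div,
      sumDiv_calcThingsLoop_zero factors bound factors.length 0 1 (by omega)]
    rw [foldl_init_eq]
    rw [bfsLoop_eq factors bound (factors.length + 1) _ _ (by intro e _; omega)]
    have hinit : levelF bound factors (initLevel bound factors 0) = Ysum bound factors 1 := by
      have h0 := levelF_initLevel factors bound factors.length 0 (by omega)
      simpa using h0
    show bound - (0 + sumDiv bound factors - Ysum bound (factors.drop 0) 1)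
      = bound - sumDiv bound factors + levelF bound factors ([] ++ initLevel bound factors 0)
    rw [List.nil_append, hinit, List.drop_zero]
    ring
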